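-- pv_equiv track=rewrite | github.com/cafferychen777/ChatSpatial | chatspatial/tools/enrichment.py | _convert_gene_format_for_matching
-- ===== SOURCE A (Python) =====
-- from typing import Any, Dict, List, Optional, Tuple, Union
--
-- def _convert_gene_format_for_matching(
--     pathway_genes: List[str],
--     dataset_genes: set,
--     species: str
-- ) -> Tuple[List[str], Dict[str, str]]:
--     """
--     Rule-based gene format conversion to match dataset format.
--
--     Handles common gene format variations between pathway databases and datasets:
--     - Uppercase (GENE) vs Title case (Gene) vs lowercase (gene)
--     - Species-specific formatting rules
--     - Special prefixes like Gm/GM/gm for mouse genes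
--
--     Args:
--         pathway_genes: Gene names from pathway database (usually uppercase from gseapy)
--         dataset_genes: Available gene names in dataset
--         species: Species specified by user ("mouse" or "human")
--
--     Returns:
--         (dataset_format_genes, conversion_map)
--         dataset_format_genes: Gene names in dataset format that can be found
--         conversion_map: Maps dataset_format -> original_pathway_format
--     """
--     dataset_format_genes = []
--     conversion_map = {}
--
--     for gene in pathway_genes:
--         # Try direct match first
--         if gene in dataset_genes:
--             dataset_format_genes.append(gene)
--             conversion_map[gene] = gene
--             continue
--
--         # Apply multiple format conversion rules
--         format_variations = []
--
--         if species == "mouse":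
--             # Mouse-specific format rules (order matters for efficiency)
--             # Rule 1: Title case (most common): Cd5l, Gbp2b
--             if len(gene) > 1:
--                 format_variations.append(gene[0].upper() + gene[1:].lower())
--             # Rule 2: All lowercase: cd5l, gbp2b
--             format_variations.append(gene.lower())
--             # Rule 3: All uppercase: CD5L, GBP2B
--             format_variations.append(gene.upper())
--             # Rule 4: Capitalize first letter only
--             format_variations.append(gene.capitalize())
--
--             # Special rule for Gm-prefixed genes (common in mouse)
--             if gene.upper().startswith('GM'):
--                 format_variations.extend([
--                     'gm' + gene[2:].lower(),  # gm42418
--                     'Gm' + gene[2:].lower(),  # Gm42418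
--                     'GM' + gene[2:].upper(),  # GM42418
--                 ])
--
--         elif species == "human":
--             # Human-specific format rules
--             # Rule 1: All uppercase (most common): HES1, FABP4
--             format_variations.append(gene.upper())
--             # Rule 2: All lowercase: hes1, fabp4
--             format_variations.append(gene.lower())
--             # Rule 3: Capitalize first letter
--             format_variations.append(gene.capitalize())
--
--         # Remove duplicates while preserving order
--         seen = set()
--         unique_variations = []
--         for variation in format_variations:
--             if variation not in seen and variation != gene:  # Skip if same as original
--                 seen.add(variation)
--                 unique_variations.append(variation)
--
--         # Try each format variation against dataset
--         for variant in unique_variations: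
--             if variant in dataset_genes:
--                 dataset_format_genes.append(variant)  # Use dataset's actual format
--                 conversion_map[variant] = gene
--                 break  # Stop after first match
--
--     return dataset_format_genes, conversion_map
-- ===== SOURCE B (Python) =====
-- def _candidate_formats(gene, species):
--     """Ordered candidate formats for a gene, highest priority first (the gene
--     itself, then the species-specific case variations). May contain repeats;
--     priority of a string is its FIRST position in this list."""
--     cands = [gene]
--     if species == "mouse":
--         if len(gene) > 1:
--             cands.append(gene[0].upper() + gene[1:].lower())
--         cands += [gene.lower(), gene.upper(), gene.capitalize()]
--         if gene.upper().startswith('GM'):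
--             tail = gene[2:]
--             cands += ['gm' + tail.lower(), 'Gm' + tail.lower(), 'GM' + tail.upper()]
--     elif species == "human":
--         cands += [gene.upper(), gene.lower(), gene.capitalize()]
--     return cands
--
--
-- def _convert_gene_format_for_matching(pathway_genes, dataset_genes, species):
--     # Invert the search: index the dataset once by lowercased name, then for each
--     # pathway gene scan only its (tiny) bucket of same-lowercase dataset genes and
--     # keep the dataset gene of best (lowest) candidate priority.  Every candidate
--     # format is a case variation of the gene, so any candidate present in the
--     # dataset lies in the gene's bucket.
--     index = {}
--     for d in dataset_genes:
--         index.setdefault(d.lower(), []).append(d)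
--
--     dataset_format_genes = []
--     conversion_map = {}
--     for gene in pathway_genes:
--         cands = _candidate_formats(gene, species)
--         best_rank, best = len(cands), None
--         for d in index.get(gene.lower(), ()):
--             try:
--                 r = cands.index(d)
--             except ValueError:
--                 continue
--             if r < best_rank:
--                 best_rank, best = r, d
--         if best is not None:
--             dataset_format_genes.append(best)
--             conversion_map[best] = gene
--     return dataset_format_genes, conversion_map
-- ===== Notes on version B (the rewrite author's own statement) =====
-- stated objective: alternative
-- what changed: Inverts the search direction: instead of generating case variants per gene and probing the dataset set with an early break (A), B builds a reverse index of the dataset keyed by lowercased name once, then for each pathway gene scans only its bucket of same-lowercase dataset genes and keeps the one of minimal candidate priority (argmin by first position in the candidate list).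
import Mathlib
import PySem

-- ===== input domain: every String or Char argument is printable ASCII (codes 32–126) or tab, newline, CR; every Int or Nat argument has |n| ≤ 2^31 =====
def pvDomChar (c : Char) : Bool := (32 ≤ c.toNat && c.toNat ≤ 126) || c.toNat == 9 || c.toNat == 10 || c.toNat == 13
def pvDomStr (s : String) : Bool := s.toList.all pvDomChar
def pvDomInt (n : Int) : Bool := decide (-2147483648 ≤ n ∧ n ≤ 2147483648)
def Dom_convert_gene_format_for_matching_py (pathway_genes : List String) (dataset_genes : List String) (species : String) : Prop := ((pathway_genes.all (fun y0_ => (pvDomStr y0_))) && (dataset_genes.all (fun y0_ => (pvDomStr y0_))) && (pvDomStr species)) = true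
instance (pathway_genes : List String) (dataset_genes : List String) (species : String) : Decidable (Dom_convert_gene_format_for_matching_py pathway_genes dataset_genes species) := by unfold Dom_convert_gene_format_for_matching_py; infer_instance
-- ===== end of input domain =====

-- B inverts the search direction: it indexes the dataset once by lowercased name and, per pathway
-- gene, picks from the gene's bucket the dataset gene of minimal candidate priority (argmin),
-- instead of A's probe-each-variant-with-early-break (objective: alternative).

-- ===== PORT A =====

-- str.capitalize (exact on the ASCII domain, where titlecase of the first char = upper)
def pyCapitalize (s : String) : String :=
  match s.toList with
  | [] => ""
  | c :: t => String.ofList (PySem.Chars.upperChar c :: PySem.Chars.lower t)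

-- the format_variations list A builds for one gene (same appends, same order)
def variationsA (gene : String) (species : String) : List String :=
  if species = "mouse" then
    let fv : List String := []
    -- Rule 1: gene[0].upper() + gene[1:].lower()   (guarded by len(gene) > 1)
    let fv := if 1 < gene.toList.length then
        fv ++ [String.ofList (PySem.Chars.upper (PySem.Chars.slice gene.toList (some 0) (some 1)) ++
                          PySem.Chars.lower (PySem.Chars.slice gene.toList (some 1) none))]
      else fv
    let fv := fv ++ [PySem.Str.lower gene]
    let fv := fv ++ [PySem.Str.upper gene]
    let fv := fv ++ [pyCapitalize gene]
    if PySem.Str.startswith (PySem.Str.upper gene) "GM" then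
      fv ++ [String.ofList ('g' :: 'm' :: PySem.Chars.lower (PySem.Chars.slice gene.toList (some 2) none)),
             String.ofList ('G' :: 'm' :: PySem.Chars.lower (PySem.Chars.slice gene.toList (some 2) none)),
             String.ofList ('G' :: 'M' :: PySem.Chars.upper (PySem.Chars.slice gene.toList (some 2) none))]
    else fv
  else if species = "human" then
    [] ++ [PySem.Str.upper gene] ++ [PySem.Str.lower gene] ++ [pyCapitalize gene]
  else []

-- one step of A's dedup loop over (seen, unique_variations)
def uniqStep (gene : String) (ac : PySem.Set String × List String) (v : String) : PySem.Set String × List String :=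
  if !(PySem.Set.contains ac.1 v) && !(v == gene) then (PySem.Set.add ac.1 v, ac.2 ++ [v]) else ac

-- A's 'for variant in unique_variations: … break' loop
def tryVariants (dg : List String) : List String → Option String
  | [] => none
  | v :: rest => if PySem.Set.contains dg v then some v else tryVariants dg rest

def convert_gene_format_for_matching_py (pathway_genes : List String) (dataset_genes : List String) (species : String) : List String × (List (String × String)) :=
  let r := pathway_genes.foldl
    (fun (acc : List String × PySem.Dict String String) gene =>
      if PySem.Set.contains dataset_genes gene then
        (acc.1 ++ [gene], acc.2.insert gene gene)
      else
        let fv := variationsA gene species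
        let uv := (fv.foldl (uniqStep gene) (PySem.Set.empty, [])).2
        match tryVariants dataset_genes uv with
        | some v => (acc.1 ++ [v], acc.2.insert v gene)
        | none => acc)
    ([], PySem.Dict.empty)
  (r.1, r.2.items)

-- ===== PORT B =====

-- _candidate_formats: the gene first, then the species variations (possibly with repeats;
-- a string's priority is its FIRST position in this list)
def candidateFormats (gene : String) (species : String) : List String :=
  let cands := [gene]
  if species = "mouse" then
    let cands := if 1 < gene.toList.length then
        cands ++ [String.ofList (PySem.Chars.upper (PySem.Chars.slice gene.toList (some 0) (some 1)) ++
                  PySem.Chars.lower (PySem.Chars.slice gene.toList (some 1) none))]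
      else cands
    let cands := cands ++ [PySem.Str.lower gene, PySem.Str.upper gene, pyCapitalize gene]
    if PySem.Str.startswith (PySem.Str.upper gene) "GM" then
      cands ++ [String.ofList ('g' :: 'm' :: PySem.Chars.lower (PySem.Chars.slice gene.toList (some 2) none)),
                String.ofList ('G' :: 'm' :: PySem.Chars.lower (PySem.Chars.slice gene.toList (some 2) none)),
                String.ofList ('G' :: 'M' :: PySem.Chars.upper (PySem.Chars.slice gene.toList (some 2) none))]
    else cands
  else if species = "human" then
    cands ++ [PySem.Str.upper gene, PySem.Str.lower gene, pyCapitalize gene]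
  else cands

-- 'index.setdefault(d.lower(), []).append(d)' over the dataset: Dict.modify is exactly
-- setdefault-then-mutate-in-place
def buildIndex (dataset_genes : List String) : PySem.Dict String (List String) :=
  dataset_genes.foldl (fun ix d => ix.modify (PySem.Str.lower d) [] (fun b => b ++ [d])) PySem.Dict.empty

-- one step of B's bucket scan: keep the dataset gene of strictly better (lower) rank;
-- cands.index raising ValueError (= index? none) skips the entry
def pickBestStep (cands : List String) (b : Nat × Option String) (d : String) : Nat × Option String :=
  match PySem.List.index? cands d with
  | none => b
  | some r => if r < b.1 then (r, some d) else b

def convert_gene_format_for_matching_py_alt (pathway_genes : List String) (dataset_genes : List String) (species : String) : List String × (List (String × String)) :=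
  let index := buildIndex dataset_genes
  let r := pathway_genes.foldl
    (fun (acc : List String × PySem.Dict String String) gene =>
      let cands := candidateFormats gene species
      let best := (index.getD (PySem.Str.lower gene) []).foldl (pickBestStep cands) (cands.length, none)
      match best.2 with
      | some d => (acc.1 ++ [d], acc.2.insert d gene)
      | none => acc)
    ([], PySem.Dict.empty)
  (r.1, r.2.items)

-- ===== PRECONDITION & SPEC =====
def Spec_convert_gene_format_for_matching_py (pathway_genes : List String) (dataset_genes : List String) (species : String) (out : List String × (List (String × String))) : Prop := out = convert_gene_format_for_matching_py_alt pathway_genes dataset_genes species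
instance (pathway_genes : List String) (dataset_genes : List String) (species : String) (out : List String × (List (String × String))) : Decidable (Spec_convert_gene_format_for_matching_py pathway_genes dataset_genes species out) := by unfold Spec_convert_gene_format_for_matching_py; infer_instance

-- ===== CLAIM (what is proved, stated in full; the proofs are below) =====
def Claim_equal_convert_gene_format_for_matching_py : Prop := ∀ (pathway_genes : List String) (dataset_genes : List String) (species : String), Dom_convert_gene_format_for_matching_py pathway_genes dataset_genes species → Spec_convert_gene_format_for_matching_py pathway_genes dataset_genes species (convert_gene_format_for_matching_py pathway_genes dataset_genes species)

-- ===== LEMMAS AND PROOFS =====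

-- ---- character-level case facts ----
theorem char_le_iff (a b : Char) : a ≤ b ↔ a.toNat ≤ b.toNat := by
  rw [Char.le_def, UInt32.le_iff_toNat_le]; rfl

theorem toNat_of_islower (c : Char) (h : PySem.Chars.islower c = true) :
    97 ≤ c.toNat ∧ c.toNat ≤ 122 := by
  simp [PySem.Chars.islower, char_le_iff] at h
  exact ⟨h.1, h.2⟩

theorem toNat_of_isupper (c : Char) (h : PySem.Chars.isupper c = true) :
    65 ≤ c.toNat ∧ c.toNat ≤ 90 := by
  simp [PySem.Chars.isupper, char_le_iff] at h
  exact ⟨h.1, h.2⟩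

theorem isupper_of_toNat (c : Char) (h1 : 65 ≤ c.toNat) (h2 : c.toNat ≤ 90) :
    PySem.Chars.isupper c = true := by
  simp [PySem.Chars.isupper, char_le_iff]
  exact ⟨h1, h2⟩

theorem islower_of_toNat (c : Char) (h1 : 97 ≤ c.toNat) (h2 : c.toNat ≤ 122) :
    PySem.Chars.islower c = true := by
  simp [PySem.Chars.islower, char_le_iff]
  exact ⟨h1, h2⟩

theorem not_isupper_of_islower (c : Char) (h : PySem.Chars.islower c = true) :
    PySem.Chars.isupper c = false := by
  have := toNat_of_islower c h
  by_contra hc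
  have h2 := toNat_of_isupper c (by simpa using hc)
  omega

theorem lc_uc (c : Char) : PySem.Chars.lowerChar (PySem.Chars.upperChar c) = PySem.Chars.lowerChar c := by
  by_cases h : PySem.Chars.islower c = true
  · obtain ⟨h1, h2⟩ := toNat_of_islower c h
    have hval : (c.toNat - 32).isValidChar := by left; omega
    have htn : (Char.ofNat (c.toNat - 32)).toNat = c.toNat - 32 := by
      rw [Char.toNat_ofNat, if_pos hval]
    have hup : PySem.Chars.isupper (Char.ofNat (c.toNat - 32)) = true :=
      isupper_of_toNat _ (by omega) (by omega)
    have hlo : PySem.Chars.lowerChar c = c := by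
      simp [PySem.Chars.lowerChar, not_isupper_of_islower c h]
    rw [PySem.Chars.upperChar]
    simp only [h, if_true]
    rw [PySem.Chars.lowerChar]
    simp only [hup, if_true, htn]
    rw [hlo]
    have : c.toNat - 32 + 32 = c.toNat := by omega
    rw [this, Char.ofNat_toNat]
  · simp [PySem.Chars.upperChar, h]

theorem lc_lc (c : Char) : PySem.Chars.lowerChar (PySem.Chars.lowerChar c) = PySem.Chars.lowerChar c := by
  by_cases h : PySem.Chars.isupper c = true
  · obtain ⟨h1, h2⟩ := toNat_of_isupper c h
    have hval : (c.toNat + 32).isValidChar := by left; omega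
    have htn : (Char.ofNat (c.toNat + 32)).toNat = c.toNat + 32 := by
      rw [Char.toNat_ofNat, if_pos hval]
    have hlo : PySem.Chars.isupper (Char.ofNat (c.toNat + 32)) = false :=
      not_isupper_of_islower _ (islower_of_toNat _ (by omega) (by omega))
    simp [PySem.Chars.lowerChar, h, hlo]
  · simp [PySem.Chars.lowerChar, h]

theorem lower_upper (l : List Char) : PySem.Chars.lower (PySem.Chars.upper l) = PySem.Chars.lower l := by
  simp [PySem.Chars.lower, PySem.Chars.upper, List.map_map, Function.comp_def, lc_uc]

theorem lower_lower (l : List Char) : PySem.Chars.lower (PySem.Chars.lower l) = PySem.Chars.lower l := by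
  simp [PySem.Chars.lower, List.map_map, Function.comp_def, lc_lc]

-- ---- every candidate format lowercases to the gene's lowercase ----
theorem gm_decomp (g : String) (h : PySem.Str.startswith (PySem.Str.upper g) "GM" = true) :
    ∃ g0 g1 t, g.toList = g0 :: g1 :: t ∧
      PySem.Chars.upperChar g0 = 'G' ∧ PySem.Chars.upperChar g1 = 'M' := by
  simp only [PySem.Str.startswith_eq, PySem.Str.toList_upper] at h
  rw [PySem.Chars.startswith_iff] at h
  obtain ⟨t', ht⟩ := h
  cases hl : g.toList with
  | nil => rw [hl] at ht; simp [PySem.Chars.upper] at ht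
  | cons g0 rest =>
    cases hr : rest with
    | nil => rw [hl, hr] at ht; simp [PySem.Chars.upper] at ht
    | cons g1 t =>
      rw [hl, hr, show "GM".toList = ['G', 'M'] from rfl] at ht
      simp only [PySem.Chars.upper, List.map_cons, List.cons_append, List.nil_append,
        List.cons.injEq] at ht
      exact ⟨g0, g1, t, rfl, ht.1.symm, ht.2.1.symm⟩

-- lower of the capitalize candidate
theorem lower_pyCapitalize (g : String) :
    PySem.Chars.lower (pyCapitalize g).toList = PySem.Chars.lower g.toList := by
  unfold pyCapitalize
  cases hl : g.toList with
  | nil => simp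
  | cons c t =>
    simp only [String.toList_ofList, PySem.Chars.lower, List.map_cons, lc_uc]
    rw [List.map_map]
    simp [Function.comp_def, lc_lc]

-- lower of the Rule-1 candidate (gene[0].upper() + gene[1:].lower())
theorem lower_rule1 (l : List Char) :
    PySem.Chars.lower (String.ofList (PySem.Chars.upper (PySem.Chars.slice l (some 0) (some 1)) ++
      PySem.Chars.lower (PySem.Chars.slice l (some 1) none))).toList = PySem.Chars.lower l := by
  rw [String.toList_ofList]
  have h01 : PySem.Chars.slice l (some 0) (some 1) = l.take 1 := by
    simp only [PySem.Chars.slice_eq_listSlice]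
    rw [PySem.List.slice_toNat] <;> simp
  have h1 : PySem.Chars.slice l (some 1) none = l.drop 1 := by
    simp only [PySem.Chars.slice_eq_listSlice]
    rw [PySem.List.slice_from] <;> simp
  rw [h01, h1]
  conv_rhs => rw [← List.take_append_drop 1 l]
  simp [PySem.Chars.lower, PySem.Chars.upper, List.map_map, Function.comp_def, lc_uc, lc_lc]

theorem lower_strLower (g : String) :
    PySem.Chars.lower (PySem.Str.lower g).toList = PySem.Chars.lower g.toList := by
  simp only [PySem.Str.toList_lower]; exact lower_lower g.toList

theorem lower_strUpper (g : String) :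
    PySem.Chars.lower (PySem.Str.upper g).toList = PySem.Chars.lower g.toList := by
  simp only [PySem.Str.toList_upper]; exact lower_upper g.toList

-- a gene whose uppercase starts with "GM": its lowercase is 'g' :: 'm' :: lower(tail)
theorem gm_lower (g : String) (hgm : PySem.Str.startswith (PySem.Str.upper g) "GM" = true) :
    ∃ t, PySem.Chars.slice g.toList (some 2) none = t ∧
      PySem.Chars.lower g.toList = 'g' :: 'm' :: PySem.Chars.lower t := by
  obtain ⟨g0, g1, t, hl, hG, hM⟩ := gm_decomp g hgm
  have hg0 : PySem.Chars.lowerChar g0 = 'g' := by rw [← lc_uc, hG]; decide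
  have hg1 : PySem.Chars.lowerChar g1 = 'm' := by rw [← lc_uc, hM]; decide
  refine ⟨t, ?_, ?_⟩
  · simp only [PySem.Chars.slice_eq_listSlice]
    rw [PySem.List.slice_from] <;> simp [hl]
  · rw [hl]; simp [PySem.Chars.lower, hg0, hg1]

theorem lower_gm1 (g : String) (hgm : PySem.Str.startswith (PySem.Str.upper g) "GM" = true) :
    PySem.Chars.lower (String.ofList ('g' :: 'm' ::
      PySem.Chars.lower (PySem.Chars.slice g.toList (some 2) none))).toList =
      PySem.Chars.lower g.toList := by
  obtain ⟨t, hsl, hlow⟩ := gm_lower g hgm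
  rw [String.toList_ofList, hsl, hlow]
  have c1 : PySem.Chars.lowerChar 'g' = 'g' := by decide
  have c2 : PySem.Chars.lowerChar 'm' = 'm' := by decide
  simp [PySem.Chars.lower, List.map_map, Function.comp_def, lc_lc, c1, c2]

theorem lower_gm2 (g : String) (hgm : PySem.Str.startswith (PySem.Str.upper g) "GM" = true) :
    PySem.Chars.lower (String.ofList ('G' :: 'm' ::
      PySem.Chars.lower (PySem.Chars.slice g.toList (some 2) none))).toList =
      PySem.Chars.lower g.toList := by
  obtain ⟨t, hsl, hlow⟩ := gm_lower g hgm
  rw [String.toList_ofList, hsl, hlow]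
  have c1 : PySem.Chars.lowerChar 'G' = 'g' := by decide
  have c2 : PySem.Chars.lowerChar 'm' = 'm' := by decide
  simp [PySem.Chars.lower, List.map_map, Function.comp_def, lc_lc, c1, c2]

theorem lower_gm3 (g : String) (hgm : PySem.Str.startswith (PySem.Str.upper g) "GM" = true) :
    PySem.Chars.lower (String.ofList ('G' :: 'M' ::
      PySem.Chars.upper (PySem.Chars.slice g.toList (some 2) none))).toList =
      PySem.Chars.lower g.toList := by
  obtain ⟨t, hsl, hlow⟩ := gm_lower g hgm
  rw [String.toList_ofList, hsl, hlow]
  have c1 : PySem.Chars.lowerChar 'G' = 'g' := by decide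
  have c2 : PySem.Chars.lowerChar 'M' = 'm' := by decide
  simp [PySem.Chars.lower, PySem.Chars.upper, List.map_map, Function.comp_def, lc_uc, c1, c2]

theorem lower_cands (gene species : String) :
    ∀ c ∈ candidateFormats gene species, PySem.Str.lower c = PySem.Str.lower gene := by
  intro c hc
  apply String.toList_inj.mp
  simp only [PySem.Str.toList_lower]
  unfold candidateFormats at hc
  by_cases hm : species = "mouse"
  · simp only [hm, if_true] at hc
    by_cases hgm : PySem.Str.startswith (PySem.Str.upper gene) "GM" = true
    · rw [if_pos hgm] at hc
      by_cases hlen : 1 < gene.toList.length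
      · rw [if_pos hlen] at hc
        simp only [List.cons_append, List.nil_append, List.mem_append, List.mem_cons,
          List.not_mem_nil, or_false] at hc
        rcases hc with rfl | rfl | rfl | rfl | rfl | rfl | rfl | rfl
        · rfl
        · exact lower_rule1 gene.toList
        · exact lower_strLower gene
        · exact lower_strUpper gene
        · exact lower_pyCapitalize gene
        · exact lower_gm1 gene hgm
        · exact lower_gm2 gene hgm
        · exact lower_gm3 gene hgm
      · rw [if_neg hlen] at hc
        simp only [List.cons_append, List.nil_append, List.mem_append, List.mem_cons,
          List.not_mem_nil, or_false] at hc
        rcases hc with rfl | rfl | rfl | rfl | rfl | rfl | rfl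
        · rfl
        · exact lower_strLower gene
        · exact lower_strUpper gene
        · exact lower_pyCapitalize gene
        · exact lower_gm1 gene hgm
        · exact lower_gm2 gene hgm
        · exact lower_gm3 gene hgm
    · rw [if_neg hgm] at hc
      by_cases hlen : 1 < gene.toList.length
      · rw [if_pos hlen] at hc
        simp only [List.cons_append, List.nil_append, List.mem_append, List.mem_cons,
          List.not_mem_nil, or_false] at hc
        rcases hc with rfl | rfl | rfl | rfl | rfl
        · rfl
        · exact lower_rule1 gene.toList
        · exact lower_strLower gene
        · exact lower_strUpper gene
        · exact lower_pyCapitalize gene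
      · rw [if_neg hlen] at hc
        simp only [List.cons_append, List.nil_append, List.mem_append, List.mem_cons,
          List.not_mem_nil, or_false] at hc
        rcases hc with rfl | rfl | rfl | rfl
        · rfl
        · exact lower_strLower gene
        · exact lower_strUpper gene
        · exact lower_pyCapitalize gene
  · simp only [hm, if_false] at hc
    by_cases hh : species = "human"
    · simp only [hh, if_true] at hc
      simp only [List.cons_append, List.nil_append, List.mem_append, List.mem_cons,
        List.not_mem_nil, or_false] at hc
      rcases hc with rfl | rfl | rfl | rfl
      · rfl
      · exact lower_strUpper gene
      · exact lower_strLower gene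
      · exact lower_pyCapitalize gene
    · simp only [hh, if_false, List.mem_cons, List.not_mem_nil, or_false] at hc
      subst hc; rfl

-- ---- the reverse index: bucket at key k = dataset genes whose lowercase is k ----
theorem getD_buildIndex (dataset_genes : List String) (k : String) :
    (buildIndex dataset_genes).getD k [] =
      dataset_genes.filter (fun d => PySem.Str.lower d == k) := by
  unfold buildIndex
  have hmap : dataset_genes.foldl
      (fun ix d => ix.modify (PySem.Str.lower d) [] (fun b => b ++ [d])) PySem.Dict.empty
      = (dataset_genes.map (fun d => (PySem.Str.lower d, d))).foldl
          (fun ix p => ix.modify p.1 [] (fun b => b ++ [p.2])) PySem.Dict.empty := by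
    rw [List.foldl_map]
  rw [hmap, PySem.Dict.getD_foldl_modify_append]
  simp [PySem.Dict.getD_empty, List.filter_map, Function.comp_def, List.map_map]

-- ---- the bucket argmin picks the first candidate that is in the bucket ----
theorem find?_congr_mem {α : Type} (l : List α) (p q : α → Bool)
    (h : ∀ c ∈ l, p c = q c) : l.find? p = l.find? q := by
  induction l with
  | nil => rfl
  | cons x xs ih =>
    simp only [List.find?]
    rw [h x (by simp)]
    cases q x
    · exact ih (fun c hc => h c (by simp [hc]))
    · rfl

-- an element of a take is at some earlier index
theorem mem_take_index (l : List String) (n : Nat) (c : String) (h : c ∈ l.take n) :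
    ∃ i, ∃ _ : i < l.length, i < n ∧ l[i] = c := by
  obtain ⟨i, hi, he⟩ := List.getElem_of_mem h
  have hlen : i < l.length ∧ i < n := by
    have h2 := hi
    simp only [List.length_take] at h2
    omega
  refine ⟨i, hlen.1, hlen.2, ?_⟩
  rw [← he]
  exact (List.getElem_take).symm

theorem pick_aux (cands : List String) (bucket : List String) :
    ∀ (br : Nat) (best : Option String), br ≤ cands.length →
    (∀ c, best = some c → PySem.List.index? cands c = some br) →
    (bucket.foldl (pickBestStep cands) (br, best)).2 =
      ((cands.take br).find? (fun c => bucket.contains c)).or best := by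
  induction bucket with
  | nil =>
    intro br best _ _
    simp only [List.foldl_nil]
    rw [List.find?_eq_none.mpr (by intro x _ hx; simp at hx)]
    rfl
  | cons d rest ih =>
    intro br best hbr hbest
    rw [List.foldl_cons]
    cases hidx : PySem.List.index? cands d with
    | none =>
      have hd : d ∉ cands := (PySem.List.index?_eq_none_iff cands d).mp hidx
      have hstep : pickBestStep cands (br, best) d = (br, best) := by
        unfold pickBestStep; rw [hidx]
      rw [hstep, ih br best hbr hbest]
      congr 1
      apply find?_congr_mem
      intro c hcmem
      have hcc : c ∈ cands := List.mem_of_mem_take hcmem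
      have hne : ¬ c = d := fun he => hd (he ▸ hcc)
      simp [hne]
    | some r =>
      obtain ⟨hrlen, hdr, hmin⟩ := PySem.List.getElem_of_index?_eq_some hidx
      by_cases hlt : r < br
      · have hstep : pickBestStep cands (br, best) d = (r, some d) := by
          unfold pickBestStep; rw [hidx]; simp [hlt]
        rw [hstep, ih r (some d) (le_of_lt hrlen)
          (by intro c hcs; cases hcs; exact hidx)]
        have h1 : (cands.take br).take r = cands.take r := by
          rw [List.take_take]; congr 1; omega
        have hsplit : cands.take r ++ (cands.take br).drop r = cands.take br := by
          rw [← h1, List.take_append_drop]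
        have hdropcons : (cands.take br).drop r = d :: (cands.take br).drop (r + 1) := by
          rw [List.drop_eq_getElem_cons (by simp; omega)]
          congr 1
          rw [List.getElem_take]
          exact hdr
        rw [← hsplit, List.find?_append, hdropcons,
          List.find?_cons_of_pos (by simp)]
        rw [Option.or_assoc, Option.some_or]
        congr 1
        apply find?_congr_mem
        intro c hcmem
        obtain ⟨i, hil, hir, hic⟩ := mem_take_index cands r c hcmem
        have hne : ¬ c = d := fun he => hmin i hir (by rw [hic, he])
        simp [hne]
      · have hstep : pickBestStep cands (br, best) d = (br, best) := by
          unfold pickBestStep; rw [hidx]; simp [hlt]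
        rw [hstep, ih br best hbr hbest]
        congr 1
        apply find?_congr_mem
        intro c hcmem
        obtain ⟨i, hil, hir, hic⟩ := mem_take_index cands br c hcmem
        have hne : ¬ c = d := fun he => hmin i (by omega) (by rw [hic, he])
        simp [hne]

-- ---- A's per-gene step as a single find? ----
theorem dedup_cons (x : String) (xs : List String) :
    PySem.List.dedup (x :: xs) = x :: (PySem.List.dedup xs).filter (fun y => !(y == x)) := by
  simp [PySem.List.dedup_eq_ofList, PySem.Set.ofList_cons, PySem.Set.discard]

theorem tryVariants_eq_find? (dg : List String) (l : List String) :
    tryVariants dg l = l.find? (fun v => PySem.Set.contains dg v) := by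
  induction l with
  | nil => rfl
  | cons v rest ih =>
    simp only [tryVariants, List.find?]
    cases h : PySem.Set.contains dg v <;> simp [ih]

theorem uniq_snd (gene : String) (vs : List String) :
    ∀ (s : PySem.Set String) (u : List String),
    (vs.foldl (uniqStep gene) (s, u)).2 =
      u ++ (PySem.List.dedup vs).filter (fun y => !(y == gene) && !(PySem.Set.contains s y)) := by
  induction vs with
  | nil => intro s u; simp [PySem.List.dedup]
  | cons v rest ih =>
    intro s u
    rw [List.foldl_cons, dedup_cons]
    by_cases hg : v = gene
    · subst hg
      have hstep : uniqStep v (s, u) v = (s, u) := by simp [uniqStep]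
      rw [hstep, ih]
      simp only [List.filter_cons, BEq.rfl, Bool.not_true, Bool.false_and, Bool.false_eq_true,
        if_false, List.filter_filter]
      congr 1
      apply List.filter_congr
      intro y _
      cases h : y == v
      · simp
      · simp [beq_iff_eq.mp h]
    · have hgb : (v == gene) = false := beq_eq_false_iff_ne.mpr hg
      cases hc : PySem.Set.contains s v
      · have hv : v ∉ s := by
          simpa only [PySem.Set.contains_eq_listContains, List.contains_eq_mem,
            decide_eq_false_iff_not] using hc
        have hstep : uniqStep gene (s, u) v = (PySem.Set.add s v, u ++ [v]) := by
          simp [uniqStep, hgb, hv]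
        rw [hstep, ih]
        simp only [List.filter_cons, hgb, hc, Bool.not_false, Bool.and_true,
          if_true, List.filter_filter, List.append_assoc, List.singleton_append]
        congr 2
        apply List.filter_congr
        intro y _
        cases h : y == v
        · have hca : PySem.Set.contains (PySem.Set.add s v) y = PySem.Set.contains s y := by
            rw [Bool.eq_iff_iff]
            simp [PySem.Set.mem_add, beq_eq_false_iff_ne.mp h]
          rw [hca]; simp
        · have hy : y = v := beq_iff_eq.mp h
          subst hy
          have : y ∈ PySem.Set.add s y := by simp [PySem.Set.mem_add]
          simp [this]
      · have hv : v ∈ s := by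
          simpa only [PySem.Set.contains_eq_listContains, List.contains_eq_mem,
            decide_eq_true_eq] using hc
        have hstep : uniqStep gene (s, u) v = (s, u) := by simp [uniqStep, hv]
        rw [hstep, ih]
        simp only [List.filter_cons, hgb, hc, Bool.not_true, Bool.and_false, Bool.false_eq_true,
          if_false, List.filter_filter]
        congr 1
        apply List.filter_congr
        intro y _
        cases h : y == v
        · simp
        · have hy : y = v := beq_iff_eq.mp h
          subst hy
          simp [hv]

theorem candidateFormats_eq (gene : String) (species : String) :
    candidateFormats gene species = gene :: variationsA gene species := by
  unfold candidateFormats variationsA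
  split_ifs <;> simp

theorem find?_filter_ne (x : String) (p : String → Bool) (hx : p x = false) (l : List String) :
    (l.filter (fun y => !(y == x))).find? p = l.find? p := by
  induction l with
  | nil => rfl
  | cons y ys ih =>
    by_cases h : y = x
    · subst h; simp [List.find?, hx, ih]
    · have hb : (y == x) = false := beq_eq_false_iff_ne.mpr h
      simp only [List.filter_cons, hb, Bool.not_false, if_true, List.find?]
      cases hp : p y
      · exact ih
      · rfl

theorem find?_dedup (p : String → Bool) (l : List String) :
    (PySem.List.dedup l).find? p = l.find? p := by
  induction l with
  | nil => rfl
  | cons x xs ih =>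
    rw [dedup_cons]
    simp only [List.find?]
    cases hp : p x
    · rw [find?_filter_ne x p hp, ih]
    · rfl

-- A's whole per-gene step equals the first candidate found in the dataset
theorem stepA_eq (dataset_genes : List String) (species : String)
    (acc : List String × PySem.Dict String String) (gene : String) :
    (if PySem.Set.contains dataset_genes gene then
        (acc.1 ++ [gene], acc.2.insert gene gene)
      else
        let fv := variationsA gene species
        let uv := (fv.foldl (uniqStep gene) (PySem.Set.empty, [])).2
        match tryVariants dataset_genes uv with
        | some v => (acc.1 ++ [v], acc.2.insert v gene)
        | none => acc) =
    (match (candidateFormats gene species).find? (fun c => PySem.Set.contains dataset_genes c) with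
      | some c => (acc.1 ++ [c], acc.2.insert c gene)
      | none => acc) := by
  rw [candidateFormats_eq]
  cases h : PySem.Set.contains dataset_genes gene
  · rw [if_neg (by simp)]
    dsimp only
    rw [tryVariants_eq_find?, uniq_snd, List.nil_append,
      List.find?_cons_of_neg (by simpa using h)]
    have heq : ((PySem.List.dedup (variationsA gene species)).filter
        (fun y => !(y == gene) && !(PySem.Set.contains PySem.Set.empty y))) =
        ((PySem.List.dedup (variationsA gene species)).filter (fun y => !(y == gene))) := by
      apply List.filter_congr
      intro y _
      simp [PySem.Set.contains_eq_listContains, PySem.Set.empty]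
    rw [heq, find?_filter_ne gene _ (by simpa using h), find?_dedup]
  · rw [if_pos (by simp), List.find?_cons_of_pos (by simpa using h)]

-- B's whole per-gene step equals the same find?
theorem stepB_eq (dataset_genes : List String) (species : String)
    (acc : List String × PySem.Dict String String) (gene : String) :
    (let cands := candidateFormats gene species
     let best := ((buildIndex dataset_genes).getD (PySem.Str.lower gene) []).foldl
        (pickBestStep cands) (cands.length, none)
     match best.2 with
     | some d => (acc.1 ++ [d], acc.2.insert d gene)
     | none => acc) =
    (match (candidateFormats gene species).find? (fun c => PySem.Set.contains dataset_genes c) with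
      | some c => (acc.1 ++ [c], acc.2.insert c gene)
      | none => acc) := by
  dsimp only
  rw [getD_buildIndex,
    pick_aux (candidateFormats gene species) _ (candidateFormats gene species).length none
      le_rfl (by intro c hcs; cases hcs),
    List.take_length]
  have hcong : (candidateFormats gene species).find?
      (fun c => (dataset_genes.filter (fun d => PySem.Str.lower d == PySem.Str.lower gene)).contains c) =
      (candidateFormats gene species).find? (fun c => PySem.Set.contains dataset_genes c) := by
    apply find?_congr_mem
    intro c hcmem
    have hlc := lower_cands gene species c hcmem
    rw [Bool.eq_iff_iff]
    simp [List.contains_eq_mem, List.mem_filter, PySem.Set.contains_eq_listContains, hlc]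
  rw [Option.or_none, hcong]

theorem convert_gene_format_for_matching_py_spec' (pathway_genes dataset_genes : List String) (species : String) :
    convert_gene_format_for_matching_py pathway_genes dataset_genes species =
      convert_gene_format_for_matching_py_alt pathway_genes dataset_genes species := by
  unfold convert_gene_format_for_matching_py convert_gene_format_for_matching_py_alt
  have hf : (fun (acc : List String × PySem.Dict String String) gene =>
      if PySem.Set.contains dataset_genes gene then
        (acc.1 ++ [gene], acc.2.insert gene gene)
      else
        let fv := variationsA gene species
        let uv := (fv.foldl (uniqStep gene) (PySem.Set.empty, [])).2
        match tryVariants dataset_genes uv with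
        | some v => (acc.1 ++ [v], acc.2.insert v gene)
        | none => acc) =
      (fun (acc : List String × PySem.Dict String String) gene =>
        let cands := candidateFormats gene species
        let best := ((buildIndex dataset_genes).getD (PySem.Str.lower gene) []).foldl
          (pickBestStep cands) (cands.length, none)
        match best.2 with
        | some d => (acc.1 ++ [d], acc.2.insert d gene)
        | none => acc) :=
    funext fun acc => funext fun gene =>
      (stepA_eq dataset_genes species acc gene).trans (stepB_eq dataset_genes species acc gene).symm
  rw [hf]

-- ===== VERDICT (by name: the statement is the Claim_ definition above) =====
theorem convert_gene_format_for_matching_py_spec : Claim_equal_convert_gene_format_for_matching_py := by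
  intro pathway_genes dataset_genes species _
  unfold Spec_convert_gene_format_for_matching_py
  exact convert_gene_format_for_matching_py_spec' pathway_genes dataset_genes species
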